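-- pv_equiv track=rewrite | github.com/98ZhaoJeffrey/ICS4U | Algorithms/problems.py | palindromeRecursiveHelper
-- ===== SOURCE A (Python) =====
-- def palindromeRecursiveHelper(string):
--     """
--     Finds the number of palindromes in our string recursively
--
--     Args:
--         string(str)
--
--     Returns:
--         Array: Every possible substring of the string
--     """
--     length = len(string)
--
--     if length == 0:
--         return [string]
--     total = []
--     total.append(string)
--     total += palindromeRecursiveHelper(string[1:])
--     total += palindromeRecursiveHelper(string[:-1])
--     return set(total)
-- ===== SOURCE B (Python) =====
-- def palindromeRecursiveHelper(string):
--     """Same result as A, but memoized top-down: each distinct substring is solved once (O(n^2) subproblems) instead of A's exponential double recursion."""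
--     memo = {}
--
--     def go(s):
--         if s in memo:
--             return memo[s]
--         if len(s) == 0:
--             r = [s]
--         else:
--             r = set([s] + list(go(s[1:])) + list(go(s[:-1])))
--         memo[s] = r
--         return r
--
--     return go(string)
-- ===== Notes on version B (the rewrite author's own statement) =====
-- stated objective: faster
-- what changed: Top-down memoization over the O(n^2) distinct substrings replaces A's unmemoized double recursion, which recomputes the same substrings exponentially many times.
import Mathlib
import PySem

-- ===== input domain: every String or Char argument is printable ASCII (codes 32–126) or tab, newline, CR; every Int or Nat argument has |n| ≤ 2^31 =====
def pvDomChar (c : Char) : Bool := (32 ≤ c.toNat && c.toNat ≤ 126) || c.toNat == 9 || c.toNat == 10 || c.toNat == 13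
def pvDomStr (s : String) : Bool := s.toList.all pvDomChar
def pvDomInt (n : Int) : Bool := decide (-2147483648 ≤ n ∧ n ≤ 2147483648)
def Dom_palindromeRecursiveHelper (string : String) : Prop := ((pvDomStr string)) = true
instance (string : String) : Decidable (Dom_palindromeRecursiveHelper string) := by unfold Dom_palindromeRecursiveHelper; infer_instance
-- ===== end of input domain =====

-- B replaces A's unmemoized exponential double recursion by a top-down memoized one
-- (one dict entry per distinct substring); same return value.
-- Strings are ported through List Char (PySem.List.slice is exact for s[1:] and s[:-1]).

-- ===== PORT A =====
-- A on the character list: if len == 0 return [string]; else set([string] + rec(s[1:]) + rec(s[:-1])).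
def pvGoA (cs : List Char) : List (List Char) :=
  if cs.length = 0 then [cs]
  else PySem.Set.ofList ([cs] ++ pvGoA (PySem.List.slice cs (some 1) none)
                              ++ pvGoA (PySem.List.slice cs none (some (-1))))
termination_by cs.length
decreasing_by
  · simp [PySem.List.slice_from_one]; omega
  · simp [PySem.List.slice_to_neg_one]; omega

def palindromeRecursiveHelper (string : String) : List String :=
  (pvGoA string.toList).map String.ofList

-- ===== PORT B =====
-- B's helper go: memo lookup first, else recurse on s[1:] and s[:-1] threading the memo.
def pvGoB (cs : List Char) (memo : PySem.Dict (List Char) (List (List Char))) :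
    List (List Char) × PySem.Dict (List Char) (List (List Char)) :=
  match memo.get? cs with
  | some v => (v, memo)
  | none =>
    if cs.length = 0 then
      ([cs], memo.insert cs [cs])
    else
      let p1 := pvGoB (PySem.List.slice cs (some 1) none) memo
      let p2 := pvGoB (PySem.List.slice cs none (some (-1))) p1.2
      let r := PySem.Set.ofList ([cs] ++ p1.1 ++ p2.1)
      (r, p2.2.insert cs r)
termination_by cs.length
decreasing_by
  · simp [PySem.List.slice_from_one]; omega
  · simp [PySem.List.slice_to_neg_one]; omega

def palindromeRecursiveHelper_alt (string : String) : List String :=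
  ((pvGoB string.toList PySem.Dict.empty).1).map String.ofList

-- ===== PRECONDITION & SPEC =====
def Spec_palindromeRecursiveHelper (string : String) (out : List String) : Prop := out = palindromeRecursiveHelper_alt string
instance (string : String) (out : List String) : Decidable (Spec_palindromeRecursiveHelper string out) := by unfold Spec_palindromeRecursiveHelper; infer_instance

-- ===== CLAIM (what is proved, stated in full; the proofs are below) =====
def Claim_equal_palindromeRecursiveHelper : Prop := ∀ (string : String), Dom_palindromeRecursiveHelper string → Spec_palindromeRecursiveHelper string (palindromeRecursiveHelper string)

-- ===== LEMMAS AND PROOFS =====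

-- memo invariant: every cached value is the naive recursion's value at its key
def pvInv (memo : PySem.Dict (List Char) (List (List Char))) : Prop :=
  ∀ k v, memo.get? k = some v → v = pvGoA k

lemma pvInv_insert {memo : PySem.Dict (List Char) (List (List Char))}
    (h : pvInv memo) (k : List Char) (hv : v = pvGoA k) :
    pvInv (memo.insert k v) := by
  intro k' v' h'
  rw [PySem.Dict.get?_insert] at h'
  split at h'
  · cases h'; subst_vars; rfl
  · exact h k' v' h'

lemma pvGoB_spec : ∀ (n : Nat) (cs : List Char) (memo : PySem.Dict (List Char) (List (List Char))),
    cs.length ≤ n → pvInv memo →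
    (pvGoB cs memo).1 = pvGoA cs ∧ pvInv (pvGoB cs memo).2 := by
  intro n
  induction n with
  | zero =>
    intro cs memo hn hinv
    have hcs : cs = [] := List.eq_nil_of_length_eq_zero (Nat.le_zero.mp hn)
    subst hcs
    rw [pvGoB]
    cases h : memo.get? [] with
    | some v =>
      simp only
      exact ⟨hinv [] v h, hinv⟩
    | none =>
      rw [if_pos (by rfl : ([] : List Char).length = 0)]
      have hA : pvGoA [] = [[]] := by rw [pvGoA]; rfl
      exact ⟨hA.symm, pvInv_insert hinv [] hA.symm⟩
  | succ n ih =>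
    intro cs memo hn hinv
    rw [pvGoB]
    cases h : memo.get? cs with
    | some v => exact ⟨hinv cs v h, hinv⟩
    | none =>
      by_cases hc : cs.length = 0
      · rw [if_pos hc]
        have hA : pvGoA cs = [cs] := by rw [pvGoA, if_pos hc]
        exact ⟨hA.symm, pvInv_insert hinv cs hA.symm⟩
      · rw [if_neg hc]
        have hlen1 : (PySem.List.slice cs (some 1) none).length ≤ n := by
          rw [PySem.List.slice_from_one]; simp [List.length_tail]; omega
        have h1 := ih (PySem.List.slice cs (some 1) none) memo hlen1 hinv
        have hlen2 : (PySem.List.slice cs none (some (-1))).length ≤ n := by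
          rw [PySem.List.slice_to_neg_one]; simp [List.length_dropLast]; omega
        have h2 := ih (PySem.List.slice cs none (some (-1)))
          (pvGoB (PySem.List.slice cs (some 1) none) memo).2 hlen2 h1.2
        have hr : PySem.Set.ofList ([cs]
            ++ (pvGoB (PySem.List.slice cs (some 1) none) memo).1
            ++ (pvGoB (PySem.List.slice cs none (some (-1)))
                  (pvGoB (PySem.List.slice cs (some 1) none) memo).2).1) = pvGoA cs := by
          rw [h1.1, h2.1]
          conv_rhs => rw [pvGoA, if_neg hc]
        exact ⟨hr, pvInv_insert h2.2 cs hr⟩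

-- ===== VERDICT (by name: the statement is the Claim_ definition above) =====
theorem palindromeRecursiveHelper_spec : Claim_equal_palindromeRecursiveHelper := by
  intro s _
  unfold Spec_palindromeRecursiveHelper palindromeRecursiveHelper palindromeRecursiveHelper_alt
  have h := pvGoB_spec s.toList.length s.toList PySem.Dict.empty le_rfl
    (by intro k v h; simp [PySem.Dict.get?_empty] at h)
  rw [h.1]
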